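-- pv_equiv track=rewrite | github.com/varnaa/QuickDS | python/implementations/inputformatter/inputformatter.py | __matrix_from_string
-- ===== SOURCE A (Python) =====
-- def __matrix_from_string(inp, row_length, col_length):
--     """
--     :param inp: string
--     :param row_length: row length of matrix
--     :param col_length: column length of matrix
--     :return: matrix
--     """
--
--     # Split string into char array
--     inp = inp.split(",")
--
--     # Declare 2d matrix
--     matrix = [[0] * col_length for _ in range(row_length)]
--
--     ind = 0  # Index variable to traverse inp array
--
--     for i in range(row_length):
--         for j in range(col_length):
--             matrix[i][j] = int(inp[ind])
--             ind += 1
--     return matrix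
-- ===== SOURCE B (Python) =====
-- def __matrix_from_string(inp, row_length, col_length):
--     parts = inp.split(",")
--     if row_length <= 0:
--         return []
--     nums = [int(parts[k]) for k in range(row_length * col_length)]
--     return [nums[i * col_length:(i + 1) * col_length] for i in range(row_length)]
-- ===== Notes on version B (the rewrite author's own statement) =====
-- stated objective: alternative
-- what changed: Replaces A's pre-allocated zero matrix filled in place through a single running cursor by a two-pass flatten-then-partition: convert exactly the first row_length*col_length entries to a flat int list, then slice it into col_length-sized row chunks.
import Mathlib
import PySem

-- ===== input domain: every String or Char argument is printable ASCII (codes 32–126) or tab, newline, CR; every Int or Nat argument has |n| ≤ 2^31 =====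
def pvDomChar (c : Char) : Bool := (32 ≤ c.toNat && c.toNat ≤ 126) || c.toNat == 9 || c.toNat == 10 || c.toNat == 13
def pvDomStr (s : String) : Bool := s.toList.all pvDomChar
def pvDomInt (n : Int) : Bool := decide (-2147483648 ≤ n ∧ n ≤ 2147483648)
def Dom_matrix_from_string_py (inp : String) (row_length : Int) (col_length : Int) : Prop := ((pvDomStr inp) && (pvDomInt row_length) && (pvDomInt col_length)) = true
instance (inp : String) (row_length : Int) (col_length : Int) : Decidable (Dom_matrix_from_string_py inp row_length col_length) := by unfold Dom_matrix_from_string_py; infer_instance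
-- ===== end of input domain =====

-- B partitions a flat converted list into row slices instead of filling a pre-allocated matrix
-- through a running cursor (objective: alternative decomposition, same cost).

-- ===== PORT A =====
-- [0] * col_length : replicate is exact ([] for col_length ≤ 0); int(inp[ind]) under Pre_ always
-- succeeds, so the `.getD 0` default is never the returned value on admitted inputs.
def matrix_from_string_py (inp : String) (row_length : Int) (col_length : Int) : List (List Int) :=
  let parts := (PySem.Str.split? inp ",").getD []
  let matrix := (PySem.List.pyRange 0 row_length 1).map (fun _ => List.replicate col_length.toNat (0:Int))
  let st := (PySem.List.pyRange 0 row_length 1).foldl (fun (st : List (List Int) × Int) i =>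
      (PySem.List.pyRange 0 col_length 1).foldl (fun (st : List (List Int) × Int) j =>
        let v := ((PySem.List.pyGet? parts st.2).bind PySem.Int.ofStr?).getD 0
        (PySem.List.pySetD st.1 i (PySem.List.pySetD (PySem.List.pyGetD st.1 i []) j v), st.2 + 1)) st)
    (matrix, 0)
  st.1

-- ===== PORT B =====
def matrix_from_string_py_alt (inp : String) (row_length : Int) (col_length : Int) : List (List Int) :=
  let parts := (PySem.Str.split? inp ",").getD []
  if row_length ≤ 0 then []
  else
    let nums := (PySem.List.pyRange 0 (row_length * col_length) 1).map
      (fun k => ((PySem.List.pyGet? parts k).bind PySem.Int.ofStr?).getD 0)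
    (PySem.List.pyRange 0 row_length 1).map (fun i =>
      PySem.List.slice nums (some (i * col_length)) (some ((i + 1) * col_length)))

-- ===== PRECONDITION & SPEC =====
-- Pre_ excludes exactly the inputs where Python A raises: when both dimensions are positive the
-- comma-split list must contain at least row_length*col_length entries (else IndexError) and each
-- of the first row_length*col_length entries must parse as a Python int (else ValueError).
def Pre_matrix_from_string_py (inp : String) (row_length : Int) (col_length : Int) : Prop :=
  0 < row_length → 0 < col_length →
    (row_length * col_length).toNat ≤ ((PySem.Str.split? inp ",").getD []).length ∧
    ∀ s ∈ ((PySem.Str.split? inp ",").getD []).take (row_length * col_length).toNat,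
      (PySem.Int.ofStr? s).isSome = true
instance (inp : String) (row_length : Int) (col_length : Int) : Decidable (Pre_matrix_from_string_py inp row_length col_length) := by unfold Pre_matrix_from_string_py; infer_instance
def pvWitness_matrix_from_string_py : String × Int × Int := ("1,2,3,4,5,6", 2, 3)
def Spec_matrix_from_string_py (inp : String) (row_length : Int) (col_length : Int) (out : List (List Int)) : Prop := out = matrix_from_string_py_alt inp row_length col_length
instance (inp : String) (row_length : Int) (col_length : Int) (out : List (List Int)) : Decidable (Spec_matrix_from_string_py inp row_length col_length out) := by unfold Spec_matrix_from_string_py; infer_instance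

-- ===== CLAIM (what is proved, stated in full; the proofs are below) =====
def Claim_equal_matrix_from_string_py : Prop := ∀ (inp : String) (row_length : Int) (col_length : Int), Dom_matrix_from_string_py inp row_length col_length → Pre_matrix_from_string_py inp row_length col_length → Spec_matrix_from_string_py inp row_length col_length (matrix_from_string_py inp row_length col_length)

-- ===== LEMMAS AND PROOFS =====

def pvVal (parts : List String) (t : Int) : Int :=
  ((PySem.List.pyGet? parts t).bind PySem.Int.ofStr?).getD 0

theorem pvVal_def (parts : List String) (t : Int) : ((PySem.List.pyGet? parts t).bind PySem.Int.ofStr?).getD 0 = pvVal parts t := rfl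

theorem set_getElem?_self (m : List (List Int)) (i : Nat) (row : List Int) (hm : m[i]? = some row) : m.set i row = m := by
  obtain ⟨hi, hrow⟩ := List.getElem?_eq_some_iff.mp hm
  apply List.ext_getElem (by simp)
  intro k hk _
  by_cases h : k = i
  · subst h; simp [List.getElem_set_self, hrow]
  · simp [List.getElem_set]
    intro he; omega

theorem fill_row (v : Int → Int) (i : Nat) (c : Nat) : ∀ (m : List (List Int)) (row : List Int), m[i]? = some row → c ≤ row.length → ∀ (ind : Int),
  (List.range c).foldl (fun (st : List (List Int) × Int) (j : Nat) =>
     (st.1.set i ((st.1.getD i []).set j (v st.2)), st.2 + 1)) (m, ind)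
  = (m.set i ((List.range c).map (fun j : Nat => v (ind + (j:Int))) ++ row.drop c), ind + c) := by
  induction c with
  | zero => intro m row hm _ ind; simp [set_getElem?_self m i row hm]
  | succ c ih =>
    intro m row hm hc ind
    obtain ⟨hlt, hrowe⟩ := List.getElem?_eq_some_iff.mp hm
    rw [List.range_succ, List.foldl_append, ih m row hm (by omega) ind]
    simp only [List.foldl_cons, List.foldl_nil]
    have hget : ((m.set i ((List.range c).map (fun j : Nat => v (ind + (j:Int))) ++ row.drop c)).getD i [])
        = (List.range c).map (fun j : Nat => v (ind + (j:Int))) ++ row.drop c := by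
      simp [List.getD, List.getElem?_set_self hlt]
    rw [hget, List.set_set]
    congr 1
    · congr 1
      have hlen : ((List.range c).map (fun j : Nat => v (ind + (j:Int)))).length = c := by simp
      rw [List.map_append, List.set_append_right _ _ (by omega)]
      simp only [hlen, Nat.sub_self]
      rw [List.drop_eq_getElem_cons (by omega : c < row.length), List.set_cons_zero]
      simp
    · push_cast; ring

theorem fill_all (v : Int → Int) (c : Nat) (r : Nat) : ∀ (m : List (List Int)), r ≤ m.length → (∀ (k : Nat) (h : k < m.length), m[k].length = c) → ∀ (ind : Int),
  (List.range r).foldl (fun (st : List (List Int) × Int) (i : Nat) =>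
     (List.range c).foldl (fun (st : List (List Int) × Int) (j : Nat) =>
       (st.1.set i ((st.1.getD i []).set j (v st.2)), st.2 + 1)) st) (m, ind)
  = ((List.range r).map (fun i : Nat => (List.range c).map (fun j : Nat => v (ind + ((i*c : Nat) : Int) + (j:Int)))) ++ m.drop r, ind + ((r*c : Nat) : Int)) := by
  induction r with
  | zero => intro m _ _ ind; simp
  | succ r ih =>
    intro m hr hrows ind
    have hrlt : r < m.length := by omega
    obtain ⟨row, hx⟩ : ∃ row, m[r]? = some row := ⟨m[r], List.getElem?_eq_getElem hrlt⟩
    obtain ⟨h1, h2⟩ := List.getElem?_eq_some_iff.mp hx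
    have hlc : row.length = c := by rw [← h2]; exact hrows r hrlt
    rw [List.range_succ, List.foldl_append, ih m (by omega) hrows ind]
    simp only [List.foldl_cons, List.foldl_nil]
    have hlen : ((List.range r).map (fun i : Nat => (List.range c).map (fun j : Nat => v (ind + ((i*c : Nat) : Int) + (j:Int))))).length = r := by simp
    have hget : ((List.range r).map (fun i : Nat => (List.range c).map (fun j : Nat => v (ind + ((i*c : Nat) : Int) + (j:Int)))) ++ m.drop r)[r]? = some row := by
      rw [List.getElem?_append_right (le_of_eq hlen), hlen, Nat.sub_self, List.getElem?_drop, Nat.add_zero, hx]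
    rw [fill_row v r c _ row hget (le_of_eq hlc.symm) (ind + ((r*c : Nat) : Int))]
    have hrc : row.drop c = [] := List.drop_eq_nil_of_le (le_of_eq hlc)
    simp only [hrc, List.append_nil, Prod.mk.injEq]
    constructor
    · rw [List.set_append_right _ _ (le_of_eq hlen)]
      simp only [hlen, Nat.sub_self]
      rw [List.drop_eq_getElem_cons hrlt, h2, List.set_cons_zero]
      simp [List.map_append]
    · push_cast; ring

theorem chunk_eq (f : Nat → Int) (Rn Cn i : Nat) (hi : i < Rn) :
    (((List.range (Rn*Cn)).map f).drop (i*Cn)).take Cn = (List.range Cn).map (fun j => f (i*Cn + j)) := by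
  have hb : i*Cn + Cn ≤ Rn*Cn := by
    have h1 : (i+1)*Cn ≤ Rn*Cn := Nat.mul_le_mul_right Cn (by omega)
    have h2 : (i+1)*Cn = i*Cn + Cn := by ring
    omega
  apply List.ext_getElem
  · simp; omega
  · intro k h1 h2
    have hk : k < Cn := by simp at h2; omega
    simp [List.getElem_take, List.getElem_drop, List.getElem_map, List.getElem_range]

-- ===== VERDICT (by name: the statement is the Claim_ definition above) =====
theorem matrix_from_string_py_spec : Claim_equal_matrix_from_string_py := by
  intro inp R C _ _
  unfold Spec_matrix_from_string_py matrix_from_string_py matrix_from_string_py_alt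
  set parts := (PySem.Str.split? inp ",").getD [] with hparts
  by_cases hR : R ≤ 0
  · simp [PySem.List.pyRange_one_eq_nil hR, hR]
  · push_neg at hR
    rw [if_neg (by omega)]
    simp only [PySem.List.pyRange_one, Int.sub_zero, zero_add, List.foldl_map, List.map_map,
      PySem.List.pySetD_natCast, PySem.List.pyGetD_natCast, pvVal_def]
    by_cases hC : C ≤ 0
    · have hCn : C.toNat = 0 := Int.toNat_of_nonpos hC
      have hRC : (R * C).toNat = 0 := Int.toNat_of_nonpos (by nlinarith)
      simp [hCn, hRC, PySem.List.slice]
    · push_neg at hC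
      have hRn : ((R.toNat : Int)) = R := Int.toNat_of_nonneg hR.le
      have hCn : ((C.toNat : Int)) = C := Int.toNat_of_nonneg hC.le
      have hN : (R * C).toNat = R.toNat * C.toNat := by
        have h : R * C = ((R.toNat * C.toNat : Nat) : Int) := by push_cast [hRn, hCn]; ring
        rw [h, Int.toNat_natCast]
      have hlenM : R.toNat ≤ (List.map ((fun _ => List.replicate C.toNat (0:Int)) ∘ fun (k : Nat) => (k : Int)) (List.range R.toNat)).length := by simp
      have hrowsM : ∀ (k : Nat) (h : k < (List.map ((fun _ => List.replicate C.toNat (0:Int)) ∘ fun (k : Nat) => (k : Int)) (List.range R.toNat)).length), (List.map ((fun _ => List.replicate C.toNat (0:Int)) ∘ fun (k : Nat) => (k : Int)) (List.range R.toNat))[k].length = C.toNat := by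
        intro k h
        simp
      rw [fill_all (pvVal parts) C.toNat R.toNat _ hlenM hrowsM 0]
      rw [List.drop_eq_nil_of_le (by simp), List.append_nil]
      rw [hN]
      apply List.map_congr_left
      intro i hi
      have hiR : i < R.toNat := List.mem_range.mp hi
      simp only [Function.comp_apply]
      have hslice : PySem.List.slice (List.map ((fun k => pvVal parts k) ∘ fun (k : Nat) => (k : Int)) (List.range (R.toNat * C.toNat))) (some ((i : Int) * C)) (some (((i : Int) + 1) * C)) = ((List.map (fun (k : Nat) => pvVal parts (k : Int)) (List.range (R.toNat * C.toNat))).drop (i * C.toNat)).take ((i+1) * C.toNat - i * C.toNat) := by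
        have h1 : (i : Int) * C = ((i * C.toNat : Nat) : Int) := by push_cast [hCn]; ring
        have h2 : ((i : Int) + 1) * C = (((i+1) * C.toNat : Nat) : Int) := by push_cast [hCn]; ring
        rw [h1, h2, PySem.List.slice_natCast]
        rfl
      rw [hslice]
      have h3 : (i+1) * C.toNat - i * C.toNat = C.toNat := by
        have : (i+1) * C.toNat = i * C.toNat + C.toNat := by ring
        omega
      rw [h3, chunk_eq (fun (k : Nat) => pvVal parts (k : Int)) R.toNat C.toNat i hiR]
      apply List.map_congr_left
      intro j _
      congr 1
      push_cast
      ring
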